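-- pv_equiv track=rewrite | github.com/miliar/Code_Jam_Webscraper | solutions_python/Problem_116/692.py | my_trans
-- ===== SOURCE A (Python) =====
-- def my_trans(s, T):
--     result = []
--     exist_T = False
--     exist_dot = False
--     for i in s:
--         if i == 'O':
--             result.append(1)
--         elif i == 'X':
--             result.append(-1)
--         elif i == '.':
--             exist_dot = True
--             result.append(0)
--         elif i == 'T':
--             exist_T = True
--             result.append(T)
--     return result, exist_T, exist_dot
-- ===== SOURCE B (Python) =====
-- def my_trans(s, T):
--     # divide and conquer: split the string in halves, solve each half,
--     # concatenate the value lists and or-combine the flags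
--     def go(sub):
--         if not sub:
--             return [], False, False
--         if len(sub) == 1:
--             c = sub
--             if c == 'O':
--                 return [1], False, False
--             if c == 'X':
--                 return [-1], False, False
--             if c == '.':
--                 return [0], False, True
--             if c == 'T':
--                 return [T], True, False
--             return [], False, False
--         mid = len(sub) // 2
--         r1, t1, d1 = go(sub[:mid])
--         r2, t2, d2 = go(sub[mid:])
--         return r1 + r2, t1 or t2, d1 or d2
--     return go(s)
-- ===== Notes on version B (the rewrite author's own statement) =====
-- stated objective: alternative
-- what changed: Replaces the fused left-to-right loop with mutable flag state by a divide-and-conquer recursion: split the string in halves, solve each half independently, and combine by list concatenation and boolean or.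
import Mathlib
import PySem

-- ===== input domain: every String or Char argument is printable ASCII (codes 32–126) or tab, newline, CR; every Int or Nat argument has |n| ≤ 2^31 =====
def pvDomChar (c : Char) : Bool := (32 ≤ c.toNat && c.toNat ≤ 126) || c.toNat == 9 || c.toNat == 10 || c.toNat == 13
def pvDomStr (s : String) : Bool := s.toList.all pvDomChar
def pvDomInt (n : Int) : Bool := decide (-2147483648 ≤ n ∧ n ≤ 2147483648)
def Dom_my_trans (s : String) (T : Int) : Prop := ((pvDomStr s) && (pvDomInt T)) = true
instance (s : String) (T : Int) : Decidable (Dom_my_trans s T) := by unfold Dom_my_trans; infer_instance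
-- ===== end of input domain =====

-- B replaces A's fused left-to-right flag-maintaining loop by a divide-and-conquer
-- recursion on string halves, combining with ++ and || (alternative decomposition).


-- ===== PORT A =====
-- the fused loop: state (result, exist_T, exist_dot), branches in Python's order
def my_trans (s : String) (T : Int) : List Int × Bool × Bool :=
  s.toList.foldl
    (fun st i =>
      let (result, exist_T, exist_dot) := st
      if i = 'O' then (result ++ [1], exist_T, exist_dot)
      else if i = 'X' then (result ++ [-1], exist_T, exist_dot)
      else if i = '.' then (result ++ [0], exist_T, true)
      else if i = 'T' then (result ++ [T], true, exist_dot)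
      else (result, exist_T, exist_dot))
    ([], false, false)

-- ===== PORT B =====
-- go(sub): empty / single-char base cases; else split at mid = len//2,
-- recurse on both halves, combine with ++ and or
def mtGo (T : Int) : Nat → List Char → List Int × Bool × Bool
  | _, [] => ([], false, false)
  | _, [c] =>
      if c = 'O' then ([1], false, false)
      else if c = 'X' then ([-1], false, false)
      else if c = '.' then ([0], false, true)
      else if c = 'T' then ([T], true, false)
      else ([], false, false)
  | 0, _ => ([], false, false)  -- fuel guard only; never reached when fuel ≥ length
  | Nat.succ f, l =>
      let (r1, t1, d1) := mtGo T f (l.take (l.length / 2))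
      let (r2, t2, d2) := mtGo T f (l.drop (l.length / 2))
      (r1 ++ r2, t1 || t2, d1 || d2)

def my_trans_alt (s : String) (T : Int) : List Int × Bool × Bool :=
  mtGo T s.toList.length s.toList

-- ===== PRECONDITION & SPEC =====
def Spec_my_trans (s : String) (T : Int) (out : List Int × Bool × Bool) : Prop := out = my_trans_alt s T
instance (s : String) (T : Int) (out : List Int × Bool × Bool) : Decidable (Spec_my_trans s T out) := by unfold Spec_my_trans; infer_instance

-- ===== CLAIM (what is proved, stated in full; the proofs are below) =====
def Claim_equal_my_trans : Prop := ∀ (s : String) (T : Int), Dom_my_trans s T → Spec_my_trans s T (my_trans s T)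

-- ===== LEMMAS AND PROOFS =====

-- the common characterisation both ports are reduced to
def mtv? (T : Int) (c : Char) : Option Int :=
  if c = 'O' then some 1
  else if c = 'X' then some (-1)
  else if c = '.' then some 0
  else if c = 'T' then some T
  else none

def mtSpec (T : Int) (l : List Char) : List Int × Bool × Bool :=
  (l.filterMap (mtv? T), l.contains 'T', l.contains '.')

theorem my_trans_loop (T : Int) (l : List Char) (acc : List Int) (eT ed : Bool) :
    l.foldl
      (fun st i =>
        let (result, exist_T, exist_dot) := st
        if i = 'O' then (result ++ [1], exist_T, exist_dot)
        else if i = 'X' then (result ++ [-1], exist_T, exist_dot)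
        else if i = '.' then (result ++ [0], exist_T, true)
        else if i = 'T' then (result ++ [T], true, exist_dot)
        else (result, exist_T, exist_dot))
      (acc, eT, ed)
    = (acc ++ (mtSpec T l).1, eT || (mtSpec T l).2.1, ed || (mtSpec T l).2.2) := by
  induction l generalizing acc eT ed with
  | nil => simp [mtSpec]
  | cons c cs ih =>
    by_cases hO : c = 'O'
    · subst hO; simp [ih, mtSpec, mtv?]
    · by_cases hX : c = 'X'
      · subst hX; simp [ih, mtSpec, mtv?]
      · by_cases hd : c = '.'
        · subst hd; simp [ih, mtSpec, mtv?]
        · by_cases hT : c = 'T'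
          · subst hT; simp [ih, mtSpec, mtv?]
          · simp [hO, hX, hd, hT, Ne.symm hd, Ne.symm hT, ih, mtSpec, mtv?]

theorem mtGo_spec (T : Int) : ∀ (fuel : Nat) (l : List Char), l.length ≤ fuel → mtGo T fuel l = mtSpec T l := by
  intro fuel
  induction fuel with
  | zero =>
    intro l h
    match l with
    | [] => simp [mtGo, mtSpec]
    | _ :: _ => simp at h
  | succ f ih =>
    intro l h
    match l with
    | [] => simp [mtGo, mtSpec]
    | [c] =>
      by_cases hO : c = 'O'
      · subst hO; simp [mtGo, mtSpec, mtv?]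
      · by_cases hX : c = 'X'
        · subst hX; simp [mtGo, mtSpec, mtv?]
        · by_cases hd : c = '.'
          · subst hd; simp [mtGo, mtSpec, mtv?]
          · by_cases hT : c = 'T'
            · subst hT; simp [mtGo, mtSpec, mtv?]
            · simp [mtGo, hO, hX, hd, hT, Ne.symm hd, Ne.symm hT, mtSpec, mtv?]
    | c₁ :: c₂ :: rest =>
      have hlen : (c₁ :: c₂ :: rest).length = rest.length + 2 := by simp
      have e1 := ih ((c₁ :: c₂ :: rest).take ((c₁ :: c₂ :: rest).length / 2))
        (by simp only [List.length_take, hlen] at *; omega)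
      have e2 := ih ((c₁ :: c₂ :: rest).drop ((c₁ :: c₂ :: rest).length / 2))
        (by simp only [List.length_drop, hlen] at *; omega)
      simp only [mtGo, e1, e2, mtSpec, ← List.filterMap_append, ← List.contains_append,
        List.take_append_drop]

-- ===== VERDICT (by name: the statement is the Claim_ definition above) =====
theorem my_trans_spec : Claim_equal_my_trans := by
  intro s T _
  unfold Spec_my_trans my_trans my_trans_alt
  rw [mtGo_spec T s.toList.length s.toList le_rfl]
  simpa using my_trans_loop T s.toList [] false false
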